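-- pv_equiv track=rewrite | github.com/Maithili/TAACO | dataloader/loader_assistanceAction.py | all_context_combinations
-- ===== SOURCE A (Python) =====
-- conflicting_contexts = [
--     ["early in the morning"],
--     ["user is asleep", "guests are present"],
--     ["user is asleep", "user is in a rush"],
--     ["weekday","weekend"]
-- ]
--
-- def all_context_combinations(list_of_contexts):
--     all_context_combinations = [[]]
--     for context_var in list_of_contexts:
--         this_conflicts = []
--         for conflict in conflicting_contexts:
--             if context_var in conflict:
--                 this_conflicts += [c for c in conflict if c != context_var]
--         new_context_combinations = []
--         for comb_so_far in all_context_combinations: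
--             if any([c in comb_so_far for c in this_conflicts]):
--                 continue
--             new_context_combinations.append(comb_so_far+[context_var])
--         all_context_combinations += new_context_combinations
--     all_context_combinations_binary = []
--     for comb in all_context_combinations:
--         binary = [1 if c in comb else 0 for c in list_of_contexts]
--         all_context_combinations_binary.append(binary)
--     return all_context_combinations_binary
-- ===== SOURCE B (Python) =====
-- conflicting_contexts = [
--     ["early in the morning"],
--     ["user is asleep", "guests are present"],
--     ["user is asleep", "user is in a rush"],
--     ["weekday","weekend"]
-- ]
--
-- def _conflicts_of(context_var):
--     out = []
--     for conflict in conflicting_contexts: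
--         if context_var in conflict:
--             out += [c for c in conflict if c != context_var]
--     return out
--
-- def all_context_combinations(list_of_contexts):
--     n = len(list_of_contexts)
--     result = []
--     for mask in range(1 << n):
--         comb = [list_of_contexts[i] for i in range(n) if (mask >> i) & 1]
--         if any(d in comb for c in comb for d in _conflicts_of(c)):
--             continue
--         result.append([1 if c in comb else 0 for c in list_of_contexts])
--     return result
-- ===== Notes on version B (the rewrite author's own statement) =====
-- stated objective: simpler
-- what changed: A grows conflict-free combinations incrementally (pruning as it extends each partial combination); B flatly enumerates all 2^n bitmasks in increasing order and keeps a mask iff its subset contains no conflicting pair, emitting the membership binary vector directly.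
import Mathlib
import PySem

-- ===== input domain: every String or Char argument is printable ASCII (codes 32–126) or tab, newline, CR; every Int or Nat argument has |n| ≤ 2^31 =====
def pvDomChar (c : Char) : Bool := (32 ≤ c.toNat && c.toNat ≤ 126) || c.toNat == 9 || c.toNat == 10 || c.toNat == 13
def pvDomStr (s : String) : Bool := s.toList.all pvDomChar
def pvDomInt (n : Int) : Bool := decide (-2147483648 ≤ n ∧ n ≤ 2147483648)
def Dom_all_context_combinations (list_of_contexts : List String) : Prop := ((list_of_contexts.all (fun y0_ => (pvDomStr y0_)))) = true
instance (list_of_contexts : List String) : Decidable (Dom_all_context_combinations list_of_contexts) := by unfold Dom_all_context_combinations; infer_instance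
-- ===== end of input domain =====

-- B replaces A's incremental prune-as-you-grow subset construction with a flat enumeration of all
-- bitmasks 0..2^n-1, keeping a mask iff its subset contains no conflicting pair (objective: simpler).

-- the module-level constant `conflicting_contexts`
def conflictingContexts : List (List String) :=
  [["early in the morning"],
   ["user is asleep", "guests are present"],
   ["user is asleep", "user is in a rush"],
   ["weekday", "weekend"]]

-- the conflict-collection loop (A's inner `for conflict in conflicting_contexts` loop;
-- B's helper `_conflicts_of` is the identical loop, so both ports use this definition)
def conflictsOf (context_var : String) : List String :=
  conflictingContexts.foldl (fun this_conflicts conflict =>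
    if conflict.contains context_var then
      this_conflicts ++ conflict.filter (fun c => c != context_var)
    else this_conflicts) []

-- ===== PORT A =====
def all_context_combinations (list_of_contexts : List String) : List (List Int) :=
  let combs := list_of_contexts.foldl (fun all_cc context_var =>
    let this_conflicts := conflictsOf context_var
    let new_cc := all_cc.foldl (fun ncc comb_so_far =>
      if this_conflicts.any (fun c => comb_so_far.contains c) then ncc
      else ncc ++ [comb_so_far ++ [context_var]]) []
    all_cc ++ new_cc) [[]]
  combs.foldl (fun bins comb =>
    bins ++ [list_of_contexts.map (fun c => if comb.contains c then (1 : Int) else 0)]) []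

-- ===== PORT B =====
def all_context_combinations_alt (list_of_contexts : List String) : List (List Int) :=
  let n := list_of_contexts.length
  (List.range (2 ^ n)).foldl (fun result mask =>
    let comb := ((List.range n).filter (fun i => mask.testBit i)).map
      (fun i => list_of_contexts.getD i "")
    if comb.any (fun c => (conflictsOf c).any (fun d => comb.contains d)) then result
    else result ++ [list_of_contexts.map (fun c => if comb.contains c then (1 : Int) else 0)]) []

-- ===== PRECONDITION & SPEC =====
def Spec_all_context_combinations (list_of_contexts : List String) (out : List (List Int)) : Prop := out = all_context_combinations_alt list_of_contexts
instance (list_of_contexts : List String) (out : List (List Int)) : Decidable (Spec_all_context_combinations list_of_contexts out) := by unfold Spec_all_context_combinations; infer_instance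

-- ===== CLAIM (what is proved, stated in full; the proofs are below) =====
def Claim_equal_all_context_combinations : Prop := ∀ (list_of_contexts : List String), Dom_all_context_combinations list_of_contexts → Spec_all_context_combinations list_of_contexts (all_context_combinations list_of_contexts)

-- ===== LEMMAS AND PROOFS =====

-- generic loop shape: 'if bad(x): continue else out.append(f(x))'
theorem foldl_skip_append {α β : Type} (p : α → Bool) (f : α → β) (l : List α) (acc : List β) :
    l.foldl (fun acc x => if p x then acc else acc ++ [f x]) acc
      = acc ++ (l.filter (fun x => !p x)).map f := by
  induction l generalizing acc with
  | nil => simp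
  | cons x xs ih =>
    simp only [List.foldl_cons, List.filter_cons]
    cases h : p x <;> simp [ih]

theorem conflictsOf_eq_flatMap (c : String) :
    conflictsOf c = conflictingContexts.flatMap
      (fun g => if g.contains c then g.filter (fun d => d != c) else []) := by
  unfold conflictsOf
  rw [show (fun (acc : List String) (g : List String) =>
        if g.contains c then acc ++ g.filter (fun d => d != c) else acc)
      = (fun acc g => acc ++ (if g.contains c then g.filter (fun d => d != c) else []))
    from by funext acc g; split <;> simp]
  rw [PySem.List.foldl_append_eq_flatMap]
  simp

theorem mem_conflictsOf {c d : String} :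
    d ∈ conflictsOf c ↔ ∃ g ∈ conflictingContexts, c ∈ g ∧ d ∈ g ∧ d ≠ c := by
  rw [conflictsOf_eq_flatMap]
  simp only [List.mem_flatMap]
  constructor
  · rintro ⟨g, hg, hd⟩
    split at hd
    · next h =>
      simp only [List.mem_filter, bne_iff_ne, ne_eq] at hd
      exact ⟨g, hg, by simpa using h, hd.1, by simpa using hd.2⟩
    · simp at hd
  · rintro ⟨g, hg, hc, hd, hne⟩
    refine ⟨g, hg, ?_⟩
    rw [if_pos (by simpa using hc)]
    simp [List.mem_filter, hd, hne]

theorem conflictsOf_symm {c d : String} : d ∈ conflictsOf c ↔ c ∈ conflictsOf d := by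
  rw [mem_conflictsOf, mem_conflictsOf]
  constructor <;> rintro ⟨g, hg, h1, h2, h3⟩ <;> exact ⟨g, hg, h2, h1, h3.symm⟩

theorem not_mem_conflictsOf_self (x : String) : x ∉ conflictsOf x := by
  rw [mem_conflictsOf]; rintro ⟨g, _, _, _, h⟩; exact h rfl

-- the acceptance test shared (modulo shape) by both ports
def okc (comb : List String) : Bool :=
  !(comb.any (fun c => (conflictsOf c).any (fun d => comb.contains d)))

theorem okc_append (comb : List String) (x : String) :
    okc (comb ++ [x]) = (okc comb && !((conflictsOf x).any (fun c => comb.contains c))) := by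
  unfold okc
  rw [← Bool.not_or]
  congr 1
  rw [Bool.eq_iff_iff]
  simp only [Bool.or_eq_true, List.any_append, List.any_eq_true,
    List.contains_eq_mem, List.mem_append, List.mem_singleton, List.any_cons, List.any_nil,
    Bool.or_false, decide_eq_true_eq]
  constructor
  · rintro (⟨c, hc, d, hd, hdc | rfl⟩ | ⟨d, hd, hdc | rfl⟩)
    · exact Or.inl ⟨c, hc, d, hd, hdc⟩
    · exact Or.inr ⟨c, conflictsOf_symm.mp hd, hc⟩
    · exact Or.inr ⟨d, hd, hdc⟩
    · exact absurd hd (not_mem_conflictsOf_self _)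
  · rintro (⟨c, hc, d, hd, hdc⟩ | ⟨d, hd, hdc⟩)
    · exact Or.inl ⟨c, hc, d, hd, Or.inl hdc⟩
    · exact Or.inr ⟨d, hd, Or.inl hdc⟩

-- the subset of l selected by the bits of m
def select (l : List String) (m : Nat) : List String :=
  ((List.range l.length).filter (fun i => m.testBit i)).map (fun i => l.getD i "")

-- A's combination-building loop, named for the proof
def build (l : List String) : List (List String) :=
  l.foldl (fun all_cc context_var =>
    let this_conflicts := conflictsOf context_var
    let new_cc := all_cc.foldl (fun ncc comb_so_far =>
      if this_conflicts.any (fun c => comb_so_far.contains c) then ncc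
      else ncc ++ [comb_so_far ++ [context_var]]) []
    all_cc ++ new_cc) [[]]

theorem select_low (l : List String) (x : String) (m : Nat) (hm : m < 2 ^ l.length) :
    select (l ++ [x]) m = select l m := by
  unfold select
  simp only [List.length_append, List.length_singleton]
  rw [List.range_succ, List.filter_append]
  have h1 : List.filter (fun i => m.testBit i) [l.length] = [] := by
    simp [Nat.testBit_lt_two_pow (by simpa using hm)]
  rw [h1, List.append_nil]
  apply List.map_congr_left
  intro i hi
  exact List.getD_append _ _ _ _ (List.mem_range.mp (List.mem_of_mem_filter hi))

theorem select_high (l : List String) (x : String) (m : Nat) (hm : m < 2 ^ l.length) :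
    select (l ++ [x]) (2 ^ l.length + m) = select l m ++ [x] := by
  unfold select
  simp only [List.length_append, List.length_singleton]
  rw [List.range_succ, List.filter_append]
  have h1 : List.filter (fun i => (2 ^ l.length + m).testBit i) [l.length] = [l.length] := by
    simp [Nat.testBit_two_pow_add_eq, Nat.testBit_lt_two_pow (by simpa using hm)]
  have h2 : List.filter (fun i => (2 ^ l.length + m).testBit i) (List.range l.length)
      = List.filter (fun i => m.testBit i) (List.range l.length) := by
    apply List.filter_congr
    intro i hi
    rw [Nat.testBit_two_pow_add_gt (List.mem_range.mp hi)]
  rw [h1, h2, List.map_append]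
  congr 1
  · apply List.map_congr_left
    intro i hi
    exact List.getD_append _ _ _ _ (List.mem_range.mp (List.mem_of_mem_filter hi))
  · simp

theorem build_eq_select (l : List String) :
    build l = ((List.range (2 ^ l.length)).filter (fun m => okc (select l m))).map (select l) := by
  induction l using List.reverseRecOn with
  | nil => decide
  | append_singleton l x ih =>
    have step : build (l ++ [x]) = build l ++
        ((build l).filter
          (fun comb => !((conflictsOf x).any (fun c => comb.contains c)))).map (· ++ [x]) := by
      unfold build
      rw [List.foldl_append]
      simp only [List.foldl_cons, List.foldl_nil]
      rw [foldl_skip_append, List.nil_append]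
    rw [step]
    have hlen : (l ++ [x]).length = l.length + 1 := by simp
    rw [hlen, pow_succ, Nat.mul_two, List.range_add, List.filter_append, List.filter_map,
      List.map_append, List.map_map]
    congr 1
    · -- low masks reproduce build l
      have hf : List.filter (fun m => okc (select (l ++ [x]) m)) (List.range (2 ^ l.length))
          = List.filter (fun m => okc (select l m)) (List.range (2 ^ l.length)) := by
        apply List.filter_congr
        intro m hmem
        rw [select_low l x m (List.mem_range.mp hmem)]
      rw [hf]
      rw [ih]
      apply List.map_congr_left
      intro m hmem
      exact (select_low l x m (List.mem_range.mp (List.mem_of_mem_filter hmem))).symm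
    · -- high masks reproduce the extended combinations
      rw [ih, List.filter_map, List.map_map, List.filter_filter]
      have hf : List.filter ((fun m => okc (select (l ++ [x]) m)) ∘ (fun m => 2 ^ l.length + m))
            (List.range (2 ^ l.length))
          = List.filter
            (fun m => (!((conflictsOf x).any (fun c => (select l m).contains c)))
              && okc (select l m))
            (List.range (2 ^ l.length)) := by
        apply List.filter_congr
        intro m hmem
        simp only [Function.comp]
        rw [select_high l x m (List.mem_range.mp hmem), okc_append, Bool.and_comm]
      rw [hf]
      apply List.map_congr_left
      intro m hmem
      simp only [Function.comp]
      exact (select_high l x m (List.mem_range.mp (List.mem_of_mem_filter hmem))).symm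

theorem ports_agree (l : List String) :
    all_context_combinations l = all_context_combinations_alt l := by
  unfold all_context_combinations all_context_combinations_alt
  simp only []
  rw [PySem.List.foldl_append_singleton_eq_map, List.nil_append]
  rw [show (fun (result : List (List Int)) (mask : Nat) =>
        if ((((List.range l.length).filter (fun i => mask.testBit i)).map
              (fun i => l.getD i "")).any (fun c => (conflictsOf c).any (fun d =>
                (((List.range l.length).filter (fun i => mask.testBit i)).map
                  (fun i => l.getD i "")).contains d))) then result
        else result ++ [l.map (fun c =>
          if (((List.range l.length).filter (fun i => mask.testBit i)).map
              (fun i => l.getD i "")).contains c then (1 : Int) else 0)])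
      = (fun result mask =>
        if (select l mask).any (fun c => (conflictsOf c).any (fun d =>
            (select l mask).contains d)) then result
        else result ++ [l.map (fun c =>
          if (select l mask).contains c then (1 : Int) else 0)])
    from rfl]
  rw [foldl_skip_append
      (fun mask => (select l mask).any (fun c => (conflictsOf c).any (fun d =>
        (select l mask).contains d)))
      (fun mask => l.map (fun c => if (select l mask).contains c then (1 : Int) else 0)),
    List.nil_append]
  have hb : build l = l.foldl (fun all_cc context_var =>
      all_cc ++ all_cc.foldl (fun ncc comb_so_far =>
        if (conflictsOf context_var).any (fun c => comb_so_far.contains c) then ncc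
        else ncc ++ [comb_so_far ++ [context_var]]) []) [[]] := rfl
  rw [← hb, build_eq_select, List.map_map]
  rfl

-- ===== VERDICT (by name: the statement is the Claim_ definition above) =====
theorem all_context_combinations_spec : Claim_equal_all_context_combinations := by
  intro l _
  unfold Spec_all_context_combinations
  exact ports_agree l
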